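-- pv_equiv track=rewrite | github.com/Ktwsz/wdi-zestaw2 | 7.py | foo
-- ===== SOURCE A (Python) =====
-- def foo(n):
--     i = 1
--     a = i*i+i+1
--     while a <= n:
--         if n%a == 0:
--             return True
--         i += 1
--         a = i*i+i+1
--     return False
-- ===== SOURCE B (Python) =====
-- def _is_shape(d):
--     # largest i >= 0 with i*i+i+1 <= d
--     i = 0
--     while (i + 1) * (i + 1) + (i + 1) + 1 <= d:
--         i += 1
--     return i >= 1 and i * i + i + 1 == d
--
--
-- def foo(n):
--     d = 1
--     while d * d <= n:
--         if n % d == 0: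
--             if _is_shape(d) or _is_shape(n // d):
--                 return True
--         d += 1
--     return False
-- ===== Notes on version B (the rewrite author's own statement) =====
-- stated objective: alternative
-- what changed: B enumerates the divisors of n by trial division up to sqrt(n) and tests each divisor and its cofactor for the shape i*i+i+1 (via a largest-i search), inverting A's loop that enumerates the shapes i*i+i+1 and tests divisibility.
import Mathlib
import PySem

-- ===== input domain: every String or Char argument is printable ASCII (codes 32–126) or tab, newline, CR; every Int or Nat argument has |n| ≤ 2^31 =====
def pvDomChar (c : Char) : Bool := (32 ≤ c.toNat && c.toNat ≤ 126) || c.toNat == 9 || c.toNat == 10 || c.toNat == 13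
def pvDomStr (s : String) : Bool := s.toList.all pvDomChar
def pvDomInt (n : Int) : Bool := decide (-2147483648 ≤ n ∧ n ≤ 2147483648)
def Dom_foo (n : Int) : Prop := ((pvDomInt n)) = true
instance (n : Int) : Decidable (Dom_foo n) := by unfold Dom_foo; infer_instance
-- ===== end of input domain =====

-- B enumerates the divisors of n by trial division up to √n and tests each divisor (and its
-- cofactor) for the shape i*i+i+1, instead of A's enumeration of the shapes i*i+i+1 with a
-- divisibility test; objective: alternative (same asymptotic ballpark, inverted decomposition).

-- ===== PORT A =====
-- while a <= n: if n % a == 0: return True; i += 1; a = i*i+i+1  — fuel makes the loop total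
-- (i*i+i+1 ≤ n forces i < n, so n.natAbs + 1 steps always suffice).
def fooLoopA (n : Int) : Int → Nat → Bool
  | _, 0 => false
  | i, fuel+1 =>
    if i*i + i + 1 ≤ n then
      if PySem.Int.mod n (i*i + i + 1) = 0 then true
      else fooLoopA n (i+1) fuel
    else false

def foo (n : Int) : Bool := fooLoopA n 1 (n.natAbs + 1)

-- ===== PORT B =====
-- _is_shape's while loop: largest i ≥ start with i*i+i+1 ≤ d (fuel-totalised)
def shapeLoop (d : Int) : Int → Nat → Int
  | i, 0 => i
  | i, fuel+1 =>
    if (i+1)*(i+1) + (i+1) + 1 ≤ d then shapeLoop d (i+1) fuel else i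

def isShape (d : Int) : Bool :=
  let i := shapeLoop d 0 (d.natAbs + 1)
  decide (1 ≤ i ∧ i*i + i + 1 = d)

-- foo's trial-division loop in Source B
def fooLoopB (n : Int) : Int → Nat → Bool
  | _, 0 => false
  | d, fuel+1 =>
    if d*d ≤ n then
      if PySem.Int.mod n d = 0 then
        if isShape d || isShape (PySem.Int.floordiv n d) then true
        else fooLoopB n (d+1) fuel
      else fooLoopB n (d+1) fuel
    else false

def foo_alt (n : Int) : Bool := fooLoopB n 1 (n.natAbs + 1)

-- ===== PRECONDITION & SPEC =====
def Spec_foo (n : Int) (out : Bool) : Prop := out = foo_alt n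
instance (n : Int) (out : Bool) : Decidable (Spec_foo n out) := by unfold Spec_foo; infer_instance

-- ===== CLAIM (what is proved, stated in full; the proofs are below) =====
def Claim_equal_foo : Prop := ∀ (n : Int), Dom_foo n → Spec_foo n (foo n)

-- ===== LEMMAS AND PROOFS =====

-- A's loop returns true iff some shape value i*i+i+1 (i ≥ start) is a divisor ≤ n
theorem fooLoopA_iff (n : Int) (fuel : Nat) (i : Int) (hi : 1 ≤ i) (hfuel : n < i + fuel) :
    fooLoopA n i fuel = true ↔
      ∃ j : Int, i ≤ j ∧ j*j + j + 1 ≤ n ∧ (j*j + j + 1) ∣ n := by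
  induction fuel generalizing i with
  | zero =>
    simp only [fooLoopA]
    constructor
    · intro h; exact absurd h (by simp)
    · rintro ⟨j, hij, hle, -⟩
      exfalso
      have : 0 ≤ j*j := mul_self_nonneg j
      omega
  | succ fuel ih =>
    simp only [fooLoopA]
    by_cases hle : i*i + i + 1 ≤ n
    · simp only [hle, if_true]
      by_cases hmod : PySem.Int.mod n (i*i + i + 1) = 0
      · simp only [hmod, if_true]
        constructor
        · intro _
          exact ⟨i, le_refl i, hle, (PySem.Int.mod_eq_zero_iff_dvd n _).mp hmod⟩
        · intro _; trivial
      · simp only [hmod, if_false]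
        rw [ih (i+1) (by omega) (by omega)]
        constructor
        · rintro ⟨j, hij, h1, h2⟩; exact ⟨j, by omega, h1, h2⟩
        · rintro ⟨j, hij, h1, h2⟩
          refine ⟨j, ?_, h1, h2⟩
          rcases eq_or_lt_of_le hij with heq | hlt
          · exfalso; apply hmod
            rw [PySem.Int.mod_eq_zero_iff_dvd]
            exact heq ▸ h2
          · omega
    · simp only [hle, if_false]
      constructor
      · intro h; exact absurd h (by simp)
      · rintro ⟨j, hij, h1, -⟩
        exfalso
        have hji : i ≤ j := hij
        have : i*i ≤ j*j := mul_le_mul hji hji (by omega) (by omega)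
        omega

theorem foo_iff (n : Int) :
    foo n = true ↔ ∃ j : Int, 1 ≤ j ∧ j*j + j + 1 ≤ n ∧ (j*j + j + 1) ∣ n := by
  unfold foo
  apply fooLoopA_iff
  · exact le_refl 1
  · have := Int.natAbs_eq n; omega

-- shapeLoop returns the largest i with i*i+i+1 ≤ d (or its start value)
theorem shapeLoop_spec (d : Int) (fuel : Nat) (i : Int) (hi : 0 ≤ i) (hfuel : d < i + fuel) :
    i ≤ shapeLoop d i fuel ∧
      (shapeLoop d i fuel = i ∨
        (shapeLoop d i fuel)*(shapeLoop d i fuel) + shapeLoop d i fuel + 1 ≤ d) ∧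
      ¬ ((shapeLoop d i fuel + 1)*(shapeLoop d i fuel + 1) + (shapeLoop d i fuel + 1) + 1 ≤ d) := by
  induction fuel generalizing i with
  | zero =>
    simp only [shapeLoop]
    refine ⟨le_refl i, Or.inl (by simp), ?_⟩
    have : 0 ≤ (i+1)*(i+1) := mul_self_nonneg (i+1)
    omega
  | succ fuel ih =>
    simp only [shapeLoop]
    by_cases hle : (i+1)*(i+1) + (i+1) + 1 ≤ d
    · simp only [hle, if_true]
      obtain ⟨h1, h2, h3⟩ := ih (i+1) (by omega) (by omega)
      refine ⟨by omega, ?_, h3⟩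
      rcases h2 with heq | hle'
      · right; rw [heq]; exact hle
      · right; exact hle'
    · simp only [hle, if_false]
      exact ⟨le_refl i, Or.inl (by simp), by simp⟩

theorem isShape_iff (d : Int) :
    isShape d = true ↔ ∃ i : Int, 1 ≤ i ∧ i*i + i + 1 = d := by
  unfold isShape
  simp only [decide_eq_true_eq]
  constructor
  · rintro ⟨h1, h2⟩
    exact ⟨_, h1, h2⟩
  · rintro ⟨i, hi1, hid⟩
    set r := shapeLoop d 0 (d.natAbs + 1) with hr
    obtain ⟨hr0, hr1, hr2⟩ := shapeLoop_spec d (d.natAbs + 1) 0 (le_refl 0)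
      (by have := Int.natAbs_eq d; omega)
    have hd3 : 3 ≤ d := by nlinarith
    -- r ≠ 0: f(0+1)=3 ≤ d would continue
    have hrpos : r*r + r + 1 ≤ d := by
      rcases hr1 with h | h
      · exfalso; apply hr2; rw [h]; norm_num; omega
      · exact h
    -- r ≤ i : f r ≤ d = f i, f strictly monotone on nonneg
    have hri : r ≤ i := by nlinarith
    -- i ≤ r : f i = d < f (r+1)
    have hir : i ≤ r := by nlinarith
    have : r = i := le_antisymm hri hir
    rw [this]; exact ⟨hi1, hid⟩

-- B's loop returns true iff some divisor e ≥ start with e*e ≤ n has e or n//e of shape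
theorem fooLoopB_iff (n : Int) (fuel : Nat) (d : Int) (hd : 1 ≤ d) (hfuel : n < d + fuel) :
    fooLoopB n d fuel = true ↔
      ∃ e : Int, d ≤ e ∧ e*e ≤ n ∧ e ∣ n ∧
        (isShape e = true ∨ isShape (PySem.Int.floordiv n e) = true) := by
  induction fuel generalizing d with
  | zero =>
    simp only [fooLoopB]
    constructor
    · intro h; exact absurd h (by simp)
    · rintro ⟨e, hde, hee, -, -⟩
      exfalso
      have hnd : n < d := by omega
      have h1e : 1 ≤ e := le_trans hd hde
      nlinarith
  | succ fuel ih =>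
    simp only [fooLoopB]
    by_cases hsq : d*d ≤ n
    · simp only [hsq, if_true]
      by_cases hmod : PySem.Int.mod n d = 0
      · simp only [hmod, if_true]
        by_cases hsh : isShape d || isShape (PySem.Int.floordiv n d)
        · simp only [hsh, if_true]
          constructor
          · intro _
            refine ⟨d, le_refl d, hsq, (PySem.Int.mod_eq_zero_iff_dvd n d).mp hmod, ?_⟩
            simpa using hsh
          · intro _; trivial
        · simp only [hsh, Bool.false_eq_true, if_false]
          rw [ih (d+1) (by omega) (by omega)]
          constructor
          · rintro ⟨e, hde, h1, h2, h3⟩; exact ⟨e, by omega, h1, h2, h3⟩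
          · rintro ⟨e, hde, h1, h2, h3⟩
            refine ⟨e, ?_, h1, h2, h3⟩
            rcases eq_or_lt_of_le hde with heq | hlt
            · exfalso
              rw [← heq] at h3
              simp only [Bool.or_eq_true] at hsh
              rcases h3 with h | h <;> [exact hsh (Or.inl h); exact hsh (Or.inr h)]
            · omega
      · simp only [hmod, if_false]
        rw [ih (d+1) (by omega) (by omega)]
        constructor
        · rintro ⟨e, hde, h1, h2, h3⟩; exact ⟨e, by omega, h1, h2, h3⟩
        · rintro ⟨e, hde, h1, h2, h3⟩
          refine ⟨e, ?_, h1, h2, h3⟩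
          rcases eq_or_lt_of_le hde with heq | hlt
          · exfalso; apply hmod
            rw [PySem.Int.mod_eq_zero_iff_dvd, heq]; exact h2
          · omega
    · simp only [hsq, if_false]
      constructor
      · intro h; exact absurd h (by simp)
      · rintro ⟨e, hde, h1, -, -⟩
        exfalso
        have h1e : 1 ≤ e := le_trans hd hde
        nlinarith
  
theorem foo_alt_iff (n : Int) :
    foo_alt n = true ↔
      ∃ e : Int, 1 ≤ e ∧ e*e ≤ n ∧ e ∣ n ∧
        (isShape e = true ∨ isShape (PySem.Int.floordiv n e) = true) := by
  unfold foo_alt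
  apply fooLoopB_iff
  · exact le_refl 1
  · have := Int.natAbs_eq n; omega

-- floordiv of a positive divisor gives the cofactor
theorem floordiv_of_dvd {n e : Int} (he : 0 < e) (hd : e ∣ n) :
    e * PySem.Int.floordiv n e = n := by
  rw [PySem.Int.floordiv_eq_ediv_of_pos he]
  exact Int.mul_ediv_cancel' hd

-- the bridge: some shape value divides n (and is ≤ n) iff trial division finds one
theorem bridge (n : Int) :
    (∃ j : Int, 1 ≤ j ∧ j*j + j + 1 ≤ n ∧ (j*j + j + 1) ∣ n) ↔
    (∃ e : Int, 1 ≤ e ∧ e*e ≤ n ∧ e ∣ n ∧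
        (isShape e = true ∨ isShape (PySem.Int.floordiv n e) = true)) := by
  constructor
  · rintro ⟨j, hj, hle, hdvd⟩
    set a := j*j + j + 1 with ha
    have ha3 : 3 ≤ a := by nlinarith
    have hn : 0 < n := by omega
    obtain ⟨c, hc⟩ := id hdvd
    have hcpos : 1 ≤ c := by nlinarith
    by_cases hsq : a*a ≤ n
    · exact ⟨a, by omega, hsq, hdvd, Or.inl ((isShape_iff a).mpr ⟨j, hj, rfl⟩)⟩
    · -- cofactor c is small: c < a so c*c < c*a = n
      have hca : c < a := by nlinarith
      have hcc : c*c ≤ n := by nlinarith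
      refine ⟨c, hcpos, hcc, ⟨a, by rw [hc]; ring⟩, Or.inr ?_⟩
      have : PySem.Int.floordiv n c = a := by
        rw [PySem.Int.floordiv_eq_ediv_of_pos (by omega), hc, mul_comm]
        exact Int.mul_ediv_cancel_left a (by omega)
      rw [this]
      exact (isShape_iff a).mpr ⟨j, hj, rfl⟩
  · rintro ⟨e, he, hee, hdvd, hsh⟩
    have hn : 1 ≤ n := by nlinarith
    rcases hsh with h | h
    · obtain ⟨j, hj, hje⟩ := (isShape_iff e).mp h
      exact ⟨j, hj, by nlinarith, hje ▸ hdvd⟩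
    · set a := PySem.Int.floordiv n e with ha
      obtain ⟨j, hj, hje⟩ := (isShape_iff a).mp h
      have hmul : e * a = n := floordiv_of_dvd (by omega) hdvd
      have ha3 : 3 ≤ a := by nlinarith
      refine ⟨j, hj, ?_, ?_⟩
      · rw [hje]; nlinarith
      · rw [hje]; exact ⟨e, by rw [← hmul]; ring⟩

-- ===== VERDICT (by name: the statement is the Claim_ definition above) =====
theorem foo_spec : Claim_equal_foo := by
  intro n _
  unfold Spec_foo
  have h := (foo_iff n).trans ((bridge n).trans (foo_alt_iff n).symm)
  cases hA : foo n <;> cases hB : foo_alt n <;> simp_all
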